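-- pv_equiv track=rewrite | github.com/vecyang1/macos-display-rotator | screen_rotator.py | format_shortcut_display
-- ===== SOURCE A (Python) =====
-- from typing import Dict, List, Optional, Sequence, Union
--
-- MODIFIER_ORDER = ("ctrl", "shift", "alt", "cmd")
--
-- MODIFIER_SYMBOLS = {
--     "ctrl": "⌃",
--     "shift": "⇧",
--     "alt": "⌥",
--     "cmd": "⌘",
-- }
--
-- SPECIAL_KEY_DISPLAY = {
--     "space": "Space",
--     "enter": "↩",
--     "tab": "⇥",
--     "esc": "⎋",
-- }
--
-- def order_shortcut_keys(keys: Sequence[str]) -> List[str]: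
--     normalized: List[str] = []
--     seen = set()
--     for key in keys:
--         normalized_key = str(key).strip().lower()
--         if not normalized_key or normalized_key in seen:
--             continue
--         seen.add(normalized_key)
--         normalized.append(normalized_key)
--
--     modifiers = [key for key in MODIFIER_ORDER if key in normalized]
--     non_modifiers = [key for key in normalized if key not in MODIFIER_ORDER]
--     return modifiers + non_modifiers
--
-- def format_shortcut_display(keys: Sequence[str]) -> str:
--     ordered = order_shortcut_keys(keys)
--     if not ordered:
--         return "None"
--
--     display_parts = []
--     for key in ordered:
--         if key in MODIFIER_SYMBOLS:
--             display_parts.append(MODIFIER_SYMBOLS[key])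
--         elif key in SPECIAL_KEY_DISPLAY:
--             display_parts.append(SPECIAL_KEY_DISPLAY[key])
--         else:
--             display_parts.append(key.upper())
--     return "".join(display_parts)
-- ===== SOURCE B (Python) =====
-- from typing import List, Sequence
--
-- MODIFIER_ORDER = ("ctrl", "shift", "alt", "cmd")
--
-- MODIFIER_SYMBOLS = {
--     "ctrl": "\u2303",
--     "shift": "\u21e7",
--     "alt": "\u2325",
--     "cmd": "\u2318",
-- }
--
-- SPECIAL_KEY_DISPLAY = {
--     "space": "Space",
--     "enter": "\u21a9",
--     "tab": "\u21e5",
--     "esc": "\u238b",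
-- }
--
-- def format_shortcut_display(keys: Sequence[str]) -> str:
--     cleaned = [str(key).strip().lower() for key in keys]
--     deduped = list(dict.fromkeys(k for k in cleaned if k))
--     ordered = sorted(
--         deduped,
--         key=lambda k: MODIFIER_ORDER.index(k) if k in MODIFIER_ORDER else len(MODIFIER_ORDER),
--     )
--     return "".join(
--         MODIFIER_SYMBOLS.get(k, SPECIAL_KEY_DISPLAY.get(k, k.upper())) for k in ordered
--     ) or "None"
-- ===== Notes on version B (the rewrite author's own statement) =====
-- stated objective: simpler
-- what changed: Replaces the explicit seen-set normalization loop and the two-list modifier/non-modifier partition with dict.fromkeys dedup plus one stable sorted() keyed by modifier rank (sentinel for non-modifiers), and formats via a single join with chained dict.get defaults, using '' or 'None' for the empty case.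
import Mathlib
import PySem

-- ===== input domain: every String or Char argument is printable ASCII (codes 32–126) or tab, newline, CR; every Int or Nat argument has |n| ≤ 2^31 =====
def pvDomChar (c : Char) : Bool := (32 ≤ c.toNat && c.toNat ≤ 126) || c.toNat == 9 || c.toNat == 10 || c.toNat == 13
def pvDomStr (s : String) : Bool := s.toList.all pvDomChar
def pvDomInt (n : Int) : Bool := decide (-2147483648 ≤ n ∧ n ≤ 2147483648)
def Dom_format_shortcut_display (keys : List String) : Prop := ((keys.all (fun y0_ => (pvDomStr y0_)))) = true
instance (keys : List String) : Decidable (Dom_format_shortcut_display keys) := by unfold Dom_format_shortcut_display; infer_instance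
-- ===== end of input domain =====

-- B replaces A's seen-set normalization loop and its modifier/non-modifier partition with a
-- dict.fromkeys dedup plus one stable sort keyed by modifier rank, formatting in a single join
-- with chained dict.get defaults (objective: simpler; same cost in practice).

-- module constants shared by both Pythons
def MODIFIER_ORDER : List String := ["ctrl", "shift", "alt", "cmd"]

def MODIFIER_SYMBOLS : PySem.Dict String String :=
  ⟨[("ctrl", "⌃"), ("shift", "⇧"), ("alt", "⌥"), ("cmd", "⌘")]⟩

def SPECIAL_KEY_DISPLAY : PySem.Dict String String :=
  ⟨[("space", "Space"), ("enter", "↩"), ("tab", "⇥"), ("esc", "⎋")]⟩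

-- ===== PORT A =====
def order_shortcut_keys (keys : List String) : List String :=
  let st := keys.foldl
    (fun (acc : List String × PySem.Set String) key =>
      let normalized_key := PySem.Str.lower (PySem.Str.strip key)
      if normalized_key = "" || PySem.Set.contains acc.2 normalized_key then acc
      else (acc.1 ++ [normalized_key], PySem.Set.add acc.2 normalized_key))
    ([], PySem.Set.empty)
  let normalized := st.1
  let modifiers := MODIFIER_ORDER.filter (fun key => decide (key ∈ normalized))
  let non_modifiers := normalized.filter (fun key => decide (key ∉ MODIFIER_ORDER))
  modifiers ++ non_modifiers

def format_shortcut_display (keys : List String) : String :=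
  let ordered := order_shortcut_keys keys
  if ordered = [] then "None"
  else
    let display_parts := ordered.foldl
      (fun acc key =>
        match PySem.Dict.get? MODIFIER_SYMBOLS key with
        | some v => acc ++ [v]
        | none =>
          match PySem.Dict.get? SPECIAL_KEY_DISPLAY key with
          | some v => acc ++ [v]
          | none => acc ++ [PySem.Str.upper key])
      []
    PySem.Str.join "" display_parts

-- ===== PORT B =====
-- sort key: MODIFIER_ORDER.index(k) if k in MODIFIER_ORDER else len(MODIFIER_ORDER)
def fsdKey (k : String) : Int :=
  if k ∈ MODIFIER_ORDER then ((PySem.List.index? MODIFIER_ORDER k).getD 0 : Nat)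
  else (MODIFIER_ORDER.length : Nat)

-- MODIFIER_SYMBOLS.get(k, SPECIAL_KEY_DISPLAY.get(k, k.upper()))
def fsdPart (k : String) : String :=
  (PySem.Dict.get? MODIFIER_SYMBOLS k).getD
    ((PySem.Dict.get? SPECIAL_KEY_DISPLAY k).getD (PySem.Str.upper k))

def format_shortcut_display_alt (keys : List String) : String :=
  let cleaned := keys.map (fun key => PySem.Str.lower (PySem.Str.strip key))
  let deduped := PySem.List.dedup (cleaned.filter (fun k => !(k == "")))
  let ordered := PySem.List.sorted deduped fsdKey false
  let s := PySem.Str.join "" (ordered.map fsdPart)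
  if s = "" then "None" else s

-- ===== PRECONDITION & SPEC =====
def Spec_format_shortcut_display (keys : List String) (out : String) : Prop := out = format_shortcut_display_alt keys
instance (keys : List String) (out : String) : Decidable (Spec_format_shortcut_display keys out) := by unfold Spec_format_shortcut_display; infer_instance

-- ===== CLAIM (what is proved, stated in full; the proofs are below) =====
def Claim_equal_format_shortcut_display : Prop := ∀ (keys : List String), Dom_format_shortcut_display keys → Spec_format_shortcut_display keys (format_shortcut_display keys)

-- ===== LEMMAS AND PROOFS =====

-- A's (normalized, seen) loop keeps both components equal, so it is a fold of one set-accumulator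
theorem fsd_foldl_pair {α β : Type} (f : (β × β) → α → (β × β)) (g : β → α → β)
    (h : ∀ t a, f (t, t) a = (g t a, g t a)) :
    ∀ (l : List α) (s : β), l.foldl f (s, s) = (l.foldl g s, l.foldl g s) := by
  intro l
  induction l with
  | nil => intro s; rfl
  | cons a l ih => intro s; simp only [List.foldl_cons, h]; exact ih (g s a)

theorem fsd_norm_loop (keys : List String) (s : List String) :
    keys.foldl
      (fun (acc : List String × PySem.Set String) key =>
        let normalized_key := PySem.Str.lower (PySem.Str.strip key)
        if normalized_key = "" || PySem.Set.contains acc.2 normalized_key then acc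
        else (acc.1 ++ [normalized_key], PySem.Set.add acc.2 normalized_key))
      (s, s)
    = (keys.foldl
        (fun t key =>
          let nk := PySem.Str.lower (PySem.Str.strip key)
          if nk = "" then t else PySem.Set.add t nk) s,
       keys.foldl
        (fun t key =>
          let nk := PySem.Str.lower (PySem.Str.strip key)
          if nk = "" then t else PySem.Set.add t nk) s) := by
  refine fsd_foldl_pair _ _ (fun t key => ?_) keys s
  show (if PySem.Str.lower (PySem.Str.strip key) = "" || PySem.Set.contains t (PySem.Str.lower (PySem.Str.strip key)) then (t, t)
        else (t ++ [PySem.Str.lower (PySem.Str.strip key)], PySem.Set.add t (PySem.Str.lower (PySem.Str.strip key)))) = _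
  generalize PySem.Str.lower (PySem.Str.strip key) = nk
  by_cases h1 : nk = "" <;> by_cases h2 : nk ∈ t <;>
    simp [PySem.Set.add, PySem.Set.contains, h1, h2]

theorem fsd_g_eq (keys : List String) : ∀ s : List String,
    keys.foldl
      (fun t key =>
        let nk := PySem.Str.lower (PySem.Str.strip key)
        if nk = "" then t else PySem.Set.add t nk) s
    = List.foldl PySem.Set.add s
        ((keys.map (fun key => PySem.Str.lower (PySem.Str.strip key))).filter (fun k => !(k == ""))) := by
  induction keys with
  | nil => intro s; simp only [List.foldl_nil, List.map_nil, List.filter_nil]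
  | cons k ks ih =>
    intro s
    simp only [List.foldl_cons, List.map_cons, List.filter_cons]
    by_cases h : PySem.Str.lower (PySem.Str.strip k) = "" <;> simp [h, ih]

-- A's normalized list is exactly B's dict.fromkeys dedup of the cleaned non-empty keys
theorem fsd_normalized_eq_dedup (keys : List String) :
    (keys.foldl
      (fun (acc : List String × PySem.Set String) key =>
        let normalized_key := PySem.Str.lower (PySem.Str.strip key)
        if normalized_key = "" || PySem.Set.contains acc.2 normalized_key then acc
        else (acc.1 ++ [normalized_key], PySem.Set.add acc.2 normalized_key))
      ([], PySem.Set.empty)).1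
    = PySem.List.dedup ((keys.map (fun key => PySem.Str.lower (PySem.Str.strip key))).filter
        (fun k => !(k == ""))) := by
  rw [show (([], PySem.Set.empty) : List String × PySem.Set String)
      = ((([] : List String), ([] : List String)) : List String × PySem.Set String) from rfl]
  rw [fsd_norm_loop keys []]
  rw [show (PySem.List.dedup ((keys.map (fun key => PySem.Str.lower (PySem.Str.strip key))).filter
        (fun k => !(k == ""))))
      = PySem.Set.ofList ((keys.map (fun key => PySem.Str.lower (PySem.Str.strip key))).filter
        (fun k => !(k == ""))) from rfl]
  rw [PySem.Set.ofList_eq_foldl]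
  exact fsd_g_eq keys []

-- stability of the insertion sort: inserting past a ≤-prefix, in front of a <-suffix
theorem fsd_insertBy_skip (bef : String → String → Bool) (x : String) (P S : List String)
    (hP : ∀ y ∈ P, bef x y = false) :
    PySem.List.insertBy bef x (P ++ S) = P ++ PySem.List.insertBy bef x S := by
  induction P with
  | nil => simp
  | cons p P' ih =>
    simp only [List.cons_append, PySem.List.insertBy]
    rw [hP p (by simp)]
    simp only [Bool.false_eq_true, if_false]
    rw [ih (fun y hy => hP y (by simp [hy]))]

theorem fsd_insertBy_front (bef : String → String → Bool) (x : String) (S : List String)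
    (hS : ∀ y ∈ S, bef x y = true) :
    PySem.List.insertBy bef x S = x :: S := by
  cases S with
  | nil => rfl
  | cons s S' =>
    simp only [PySem.List.insertBy]
    rw [hS s (by simp)]
    simp

theorem fsd_key_mem (y : String) : fsdKey y = 0 ∨ fsdKey y = 1 ∨ fsdKey y = 2 ∨ fsdKey y = 3 ∨ fsdKey y = 4 := by
  by_cases h : y ∈ MODIFIER_ORDER
  · fin_cases h <;> decide
  · right; right; right; right
    unfold fsdKey
    rw [if_neg h]
    rfl

-- the sorted order is the five key-buckets in original order (stability)
def fsdBuckets (L : List String) : List String :=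
  (L.filter (fun y => decide (fsdKey y = 0))) ++ (L.filter (fun y => decide (fsdKey y = 1))) ++
  (L.filter (fun y => decide (fsdKey y = 2))) ++ (L.filter (fun y => decide (fsdKey y = 3))) ++
  (L.filter (fun y => decide (fsdKey y = 4)))

theorem fsd_sorted_eq_buckets (L : List String) :
    PySem.List.sorted L fsdKey false = fsdBuckets L := by
  induction L using List.reverseRecOn with
  | nil => rfl
  | append_singleton L x ih =>
    rw [PySem.List.sorted_eq_foldl_insertBy] at *
    rw [List.foldl_append, List.foldl_cons, List.foldl_nil, ih]
    have hb : ∀ (v : Int) (y : String), y ∈ L.filter (fun y => decide (fsdKey y = v)) → fsdKey y = v := by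
      intro v y hy
      simpa using (List.of_mem_filter hy)
    rcases fsd_key_mem x with h | h | h | h | h <;>
      simp only [fsdBuckets, List.filter_append, List.filter_cons, List.filter_nil, h] <;>
      norm_num
    · rw [fsd_insertBy_skip _ _ _ _ (fun y hy => by simp [h, hb 0 y hy])]
      rw [fsd_insertBy_front _ _ _ (fun y hy => by
        simp only [List.mem_append] at hy
        rcases hy with hy | hy | hy | hy
        · simp [h, hb 1 y hy]
        · simp [h, hb 2 y hy]
        · simp [h, hb 3 y hy]
        · simp [h, hb 4 y hy])]
    · rw [fsd_insertBy_skip _ _ _ _ (fun y hy => by simp [h, hb 0 y hy])]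
      rw [fsd_insertBy_skip _ _ _ _ (fun y hy => by simp [h, hb 1 y hy])]
      rw [fsd_insertBy_front _ _ _ (fun y hy => by
        simp only [List.mem_append] at hy
        rcases hy with hy | hy | hy
        · simp [h, hb 2 y hy]
        · simp [h, hb 3 y hy]
        · simp [h, hb 4 y hy])]
    · rw [fsd_insertBy_skip _ _ _ _ (fun y hy => by simp [h, hb 0 y hy])]
      rw [fsd_insertBy_skip _ _ _ _ (fun y hy => by simp [h, hb 1 y hy])]
      rw [fsd_insertBy_skip _ _ _ _ (fun y hy => by simp [h, hb 2 y hy])]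
      rw [fsd_insertBy_front _ _ _ (fun y hy => by
        simp only [List.mem_append] at hy
        rcases hy with hy | hy
        · simp [h, hb 3 y hy]
        · simp [h, hb 4 y hy])]
    · rw [fsd_insertBy_skip _ _ _ _ (fun y hy => by simp [h, hb 0 y hy])]
      rw [fsd_insertBy_skip _ _ _ _ (fun y hy => by simp [h, hb 1 y hy])]
      rw [fsd_insertBy_skip _ _ _ _ (fun y hy => by simp [h, hb 2 y hy])]
      rw [fsd_insertBy_skip _ _ _ _ (fun y hy => by simp [h, hb 3 y hy])]
      rw [fsd_insertBy_front _ _ _ (fun y hy => by simp [h, hb 4 y hy])]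
    · rw [fsd_insertBy_skip _ _ _ _ (fun y hy => by simp [h, hb 0 y hy])]
      rw [fsd_insertBy_skip _ _ _ _ (fun y hy => by simp [h, hb 1 y hy])]
      rw [fsd_insertBy_skip _ _ _ _ (fun y hy => by simp [h, hb 2 y hy])]
      rw [fsd_insertBy_skip _ _ _ _ (fun y hy => by simp [h, hb 3 y hy])]
      rw [PySem.List.insertBy_of_forall_not_before _ _ _ (fun y hy => by simp [h, hb 4 y hy])]

theorem fsd_nodup_filter_eq {L : List String} (h : L.Nodup) (m : String) :
    L.filter (fun y => decide (y = m)) = if m ∈ L then [m] else [] := by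
  induction L with
  | nil => simp
  | cons a L' ih =>
    rw [List.nodup_cons] at h
    by_cases ha : a = m
    · subst ha
      have : L'.filter (fun y => decide (y = a)) = [] :=
        List.filter_eq_nil_iff.2 (fun y hy => by simp; rintro rfl; exact h.1 hy)
      simp [this]
    · simp only [List.filter_cons, List.mem_cons]
      simp [ha, ih h.2, Ne.symm ha]

theorem fsd_key_eq_zero (y : String) : decide (fsdKey y = 0) = decide (y = "ctrl") := by
  by_cases hm : y ∈ MODIFIER_ORDER
  · fin_cases hm <;> decide
  · have h4 : fsdKey y = 4 := by unfold fsdKey; rw [if_neg hm]; rfl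
    have hne : y ≠ "ctrl" := by rintro rfl; exact hm (by decide)
    simp [h4, hne]

theorem fsd_key_eq_one (y : String) : decide (fsdKey y = 1) = decide (y = "shift") := by
  by_cases hm : y ∈ MODIFIER_ORDER
  · fin_cases hm <;> decide
  · have h4 : fsdKey y = 4 := by unfold fsdKey; rw [if_neg hm]; rfl
    have hne : y ≠ "shift" := by rintro rfl; exact hm (by decide)
    simp [h4, hne]

theorem fsd_key_eq_two (y : String) : decide (fsdKey y = 2) = decide (y = "alt") := by
  by_cases hm : y ∈ MODIFIER_ORDER
  · fin_cases hm <;> decide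
  · have h4 : fsdKey y = 4 := by unfold fsdKey; rw [if_neg hm]; rfl
    have hne : y ≠ "alt" := by rintro rfl; exact hm (by decide)
    simp [h4, hne]

theorem fsd_key_eq_three (y : String) : decide (fsdKey y = 3) = decide (y = "cmd") := by
  by_cases hm : y ∈ MODIFIER_ORDER
  · fin_cases hm <;> decide
  · have h4 : fsdKey y = 4 := by unfold fsdKey; rw [if_neg hm]; rfl
    have hne : y ≠ "cmd" := by rintro rfl; exact hm (by decide)
    simp [h4, hne]

theorem fsd_key_eq_four (y : String) : decide (fsdKey y = 4) = decide (y ∉ MODIFIER_ORDER) := by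
  by_cases hm : y ∈ MODIFIER_ORDER
  · fin_cases hm <;> decide
  · have h4 : fsdKey y = 4 := by unfold fsdKey; rw [if_neg hm]; rfl
    simp [h4, hm]

-- on a duplicate-free list the buckets are exactly A's modifiers ++ non_modifiers
theorem fsd_buckets_eq_partition (L : List String) (h : L.Nodup) :
    fsdBuckets L = (MODIFIER_ORDER.filter (fun k => decide (k ∈ L)))
      ++ L.filter (fun k => decide (k ∉ MODIFIER_ORDER)) := by
  unfold fsdBuckets
  rw [List.filter_congr (fun y _ => fsd_key_eq_zero y),
      List.filter_congr (fun y _ => fsd_key_eq_one y),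
      List.filter_congr (fun y _ => fsd_key_eq_two y),
      List.filter_congr (fun y _ => fsd_key_eq_three y),
      List.filter_congr (fun y _ => fsd_key_eq_four y)]
  rw [fsd_nodup_filter_eq h "ctrl", fsd_nodup_filter_eq h "shift",
      fsd_nodup_filter_eq h "alt", fsd_nodup_filter_eq h "cmd"]
  have hmodfilter : List.filter (fun k => decide (k ∈ L)) MODIFIER_ORDER
      = (if "ctrl" ∈ L then ["ctrl"] else []) ++ ((if "shift" ∈ L then ["shift"] else [])
        ++ ((if "alt" ∈ L then ["alt"] else []) ++ (if "cmd" ∈ L then ["cmd"] else []))) := by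
    show List.filter _ ["ctrl", "shift", "alt", "cmd"] = _
    simp only [List.filter_cons, List.filter_nil]
    by_cases h1 : "ctrl" ∈ L <;> by_cases h2 : "shift" ∈ L <;>
      by_cases h3 : "alt" ∈ L <;> by_cases h4 : "cmd" ∈ L <;>
      simp [h1, h2, h3, h4]
  rw [hmodfilter]
  simp [List.append_assoc]

theorem fsd_join_ne_empty (p : String) (ps : List String) (hp : p ≠ "") :
    PySem.Str.join "" (p :: ps) ≠ "" := by
  intro hcon
  have h1 : (PySem.Str.join "" (p :: ps)).toList = [] := by rw [hcon]; rfl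
  rw [PySem.Str.toList_join] at h1
  cases ps with
  | nil => simp [PySem.Chars.join, List.intercalate] at h1; exact hp h1
  | cons q qs =>
    simp [PySem.Chars.join, List.intercalate] at h1
    exact hp h1.1

theorem fsd_part_ne_empty (k : String) (hk : k ≠ "") : fsdPart k ≠ "" := by
  by_cases h1 : k = "ctrl"; · subst h1; decide
  by_cases h2 : k = "shift"; · subst h2; decide
  by_cases h3 : k = "alt"; · subst h3; decide
  by_cases h4 : k = "cmd"; · subst h4; decide
  by_cases h5 : k = "space"; · subst h5; decide
  by_cases h6 : k = "enter"; · subst h6; decide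
  by_cases h7 : k = "tab"; · subst h7; decide
  by_cases h8 : k = "esc"; · subst h8; decide
  have e1 : ("ctrl" == k) = false := beq_eq_false_iff_ne.mpr (Ne.symm h1)
  have e2 : ("shift" == k) = false := beq_eq_false_iff_ne.mpr (Ne.symm h2)
  have e3 : ("alt" == k) = false := beq_eq_false_iff_ne.mpr (Ne.symm h3)
  have e4 : ("cmd" == k) = false := beq_eq_false_iff_ne.mpr (Ne.symm h4)
  have e5 : ("space" == k) = false := beq_eq_false_iff_ne.mpr (Ne.symm h5)
  have e6 : ("enter" == k) = false := beq_eq_false_iff_ne.mpr (Ne.symm h6)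
  have e7 : ("tab" == k) = false := beq_eq_false_iff_ne.mpr (Ne.symm h7)
  have e8 : ("esc" == k) = false := beq_eq_false_iff_ne.mpr (Ne.symm h8)
  have hms : PySem.Dict.get? MODIFIER_SYMBOLS k = none := by
    simp [PySem.Dict.get?, MODIFIER_SYMBOLS, List.find?, e1, e2, e3, e4]
  have hsp : PySem.Dict.get? SPECIAL_KEY_DISPLAY k = none := by
    simp [PySem.Dict.get?, SPECIAL_KEY_DISPLAY, List.find?, e5, e6, e7, e8]
  simp only [fsdPart, hms, hsp, Option.getD_none]
  intro hcon
  have : (PySem.Str.upper k).toList = [] := by rw [hcon]; rfl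
  rw [PySem.Str.toList_upper] at this
  simp [PySem.Chars.upper] at this
  exact hk this

-- A's display loop is a map of B's part function
theorem fsd_parts_eq (O : List String) :
    O.foldl
      (fun acc key =>
        match PySem.Dict.get? MODIFIER_SYMBOLS key with
        | some v => acc ++ [v]
        | none =>
          match PySem.Dict.get? SPECIAL_KEY_DISPLAY key with
          | some v => acc ++ [v]
          | none => acc ++ [PySem.Str.upper key])
      []
    = O.map fsdPart := by
  have hfun : (fun (acc : List String) key =>
      match PySem.Dict.get? MODIFIER_SYMBOLS key with
      | some v => acc ++ [v]
      | none =>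
        match PySem.Dict.get? SPECIAL_KEY_DISPLAY key with
        | some v => acc ++ [v]
        | none => acc ++ [PySem.Str.upper key])
      = (fun acc key => acc ++ [fsdPart key]) := by
    funext acc key
    cases hm : PySem.Dict.get? MODIFIER_SYMBOLS key <;>
      cases hs : PySem.Dict.get? SPECIAL_KEY_DISPLAY key <;>
      simp [fsdPart, hm, hs]
  rw [hfun, PySem.List.foldl_append_singleton_eq_map, List.nil_append]

theorem fsd_main (keys : List String) :
    format_shortcut_display keys = format_shortcut_display_alt keys := by
  simp only [format_shortcut_display, order_shortcut_keys, format_shortcut_display_alt]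
  rw [fsd_normalized_eq_dedup keys]
  have hnodup : (PySem.List.dedup ((keys.map (fun key => PySem.Str.lower (PySem.Str.strip key))).filter
      (fun k => !(k == "")))).Nodup := PySem.List.nodup_dedup _
  rw [fsd_buckets_eq_partition _ hnodup |>.symm, (fsd_sorted_eq_buckets _).symm]
  rw [fsd_parts_eq]
  cases hO : PySem.List.sorted (PySem.List.dedup ((keys.map (fun key => PySem.Str.lower (PySem.Str.strip key))).filter
      (fun k => !(k == "")))) fsdKey false with
  | nil => simp [show PySem.Str.join "" [] = "" from by decide]
  | cons o rest =>
    have ho : o ≠ "" := by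
      have hmem : o ∈ PySem.List.sorted (PySem.List.dedup ((keys.map (fun key => PySem.Str.lower (PySem.Str.strip key))).filter
          (fun k => !(k == "")))) fsdKey false := by rw [hO]; exact List.mem_cons_self
      rw [PySem.List.mem_sorted, PySem.List.mem_dedup] at hmem
      have := List.of_mem_filter hmem
      simpa using this
    have hne := fsd_join_ne_empty (fsdPart o) (rest.map fsdPart) (fsd_part_ne_empty o ho)
    simp only [List.map_cons]
    rw [if_neg (by simp : ¬(o :: rest = [])), if_neg hne]

-- ===== VERDICT (by name: the statement is the Claim_ definition above) =====
theorem format_shortcut_display_spec : Claim_equal_format_shortcut_display := by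
  intro keys _
  unfold Spec_format_shortcut_display
  exact fsd_main keys
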